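-- pv_equiv track=rewrite | github.com/n-AChegYag/lung_2023 | src/pytorch_lightning/generate_data_list_multicenter_1012.py | archive_centers
-- ===== SOURCE A (Python) =====
-- def archive_centers(ids):
--     center_dict = {
--         'center_1':  [],
--         'center_2':  [],
--         'center_3':  [],
--         'center_4':  [],
--         'center_5':  [],
--         'center_6':  []
--     }
--     for id in ids:
--         if id[0] in ['1', '2', '3', '4', '5', '6', '7', '8', '9']:
--             center_dict['center_1'].append(id)
--         elif id[0:2] == 'cq' or id[0:2] == 'CQ':
--             center_dict['center_2'].append(id)
--         elif id[0:2] == 'js':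
--             center_dict['center_3'].append(id)
--         elif id[0:3] == 'lyg' or id[0:3] == 'Lyg':
--             center_dict['center_4'].append(id)
--         elif id[0:2] == 'sx' or id[0:2] == 'sy':
--             center_dict['center_5'].append(id)
--         elif id[0:4] == 'lung' or id[0:4] == 'Lung':
--             center_dict['center_1'].append(id)
--         else:
--             center_dict['center_6'].append(id)
--     return center_dict
-- ===== SOURCE B (Python) =====
-- def archive_centers(ids):
--     def classify(id):
--         c = id[0]
--         if c in '123456789':
--             return 'center_1'
--         p2 = id[:2]
--         if p2 in ('cq', 'CQ'):
--             return 'center_2'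
--         if p2 == 'js':
--             return 'center_3'
--         if id[:3] in ('lyg', 'Lyg'):
--             return 'center_4'
--         if p2 in ('sx', 'sy'):
--             return 'center_5'
--         if id[:4] in ('lung', 'Lung'):
--             return 'center_1'
--         return 'center_6'
--     keys = ['center_1', 'center_2', 'center_3', 'center_4', 'center_5', 'center_6']
--     return {k: [i for i in ids if classify(i) == k] for k in keys}
-- ===== Notes on version B (the rewrite author's own statement) =====
-- stated objective: idiomatic
-- what changed: B replaces the imperative single pass that appends into a mutable dict with a pure classification function plus a dict comprehension that builds each center's bucket by filtering the input once per key.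
import Mathlib
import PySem

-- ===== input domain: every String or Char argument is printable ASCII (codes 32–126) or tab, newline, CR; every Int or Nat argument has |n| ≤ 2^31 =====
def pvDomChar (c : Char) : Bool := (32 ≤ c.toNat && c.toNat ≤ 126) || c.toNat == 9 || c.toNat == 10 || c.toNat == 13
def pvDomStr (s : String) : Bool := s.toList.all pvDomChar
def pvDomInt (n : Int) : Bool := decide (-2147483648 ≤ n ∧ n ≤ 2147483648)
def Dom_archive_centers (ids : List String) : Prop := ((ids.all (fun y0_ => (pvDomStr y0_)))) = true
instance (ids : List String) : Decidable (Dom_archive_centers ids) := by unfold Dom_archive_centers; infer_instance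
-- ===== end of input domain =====

-- B replaces A's single imperative pass appending into a mutable dict by a pure per-id
-- classification function plus a dict comprehension filtering the input once per center key
-- (idiomatic; same asymptotic cost).

-- ===== PORT A =====
def archive_centers (ids : List String) : List (String × List String) :=
  let center_dict : PySem.Dict String (List String) :=
    PySem.Dict.ofList
      [("center_1", []), ("center_2", []), ("center_3", []),
       ("center_4", []), ("center_5", []), ("center_6", [])]
  (ids.foldl (fun d id =>
      -- id[0] raises IndexError on an empty id (excluded by Pre_); elim false is the total form
      if (PySem.Str.pyGet? id 0).elim false
            (fun c => c ∈ ['1', '2', '3', '4', '5', '6', '7', '8', '9']) then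
        d.modify "center_1" [] (· ++ [id])
      else if PySem.Str.slice id (some 0) (some 2) = "cq" ∨
              PySem.Str.slice id (some 0) (some 2) = "CQ" then
        d.modify "center_2" [] (· ++ [id])
      else if PySem.Str.slice id (some 0) (some 2) = "js" then
        d.modify "center_3" [] (· ++ [id])
      else if PySem.Str.slice id (some 0) (some 3) = "lyg" ∨
              PySem.Str.slice id (some 0) (some 3) = "Lyg" then
        d.modify "center_4" [] (· ++ [id])
      else if PySem.Str.slice id (some 0) (some 2) = "sx" ∨
              PySem.Str.slice id (some 0) (some 2) = "sy" then
        d.modify "center_5" [] (· ++ [id])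
      else if PySem.Str.slice id (some 0) (some 4) = "lung" ∨
              PySem.Str.slice id (some 0) (some 4) = "Lung" then
        d.modify "center_1" [] (· ++ [id])
      else
        d.modify "center_6" [] (· ++ [id])) center_dict).items

-- ===== PORT B =====
def pvClassify (id : String) : String :=
  match PySem.Str.pyGet? id 0 with
  | none => "center_6"   -- id[0] raises IndexError on an empty id in Python (excluded by Pre_)
  | some c =>
    if c ∈ "123456789".toList then "center_1"
    else
      let p2 := PySem.Str.slice id (some 0) (some 2)
      if p2 = "cq" ∨ p2 = "CQ" then "center_2"
      else if p2 = "js" then "center_3"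
      else if PySem.Str.slice id (some 0) (some 3) = "lyg" ∨
              PySem.Str.slice id (some 0) (some 3) = "Lyg" then "center_4"
      else if p2 = "sx" ∨ p2 = "sy" then "center_5"
      else if PySem.Str.slice id (some 0) (some 4) = "lung" ∨
              PySem.Str.slice id (some 0) (some 4) = "Lung" then "center_1"
      else "center_6"

def archive_centers_alt (ids : List String) : List (String × List String) :=
  ["center_1", "center_2", "center_3", "center_4", "center_5", "center_6"].map
    (fun k => (k, ids.filter (fun i => pvClassify i == k)))

-- ===== PRECONDITION & SPEC =====
-- Pre_ excludes lists containing an empty string, on which A (and B alike) raises IndexError at id[0].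
def Pre_archive_centers (ids : List String) : Prop := ∀ id ∈ ids, id ≠ ""
instance (ids : List String) : Decidable (Pre_archive_centers ids) := by
  unfold Pre_archive_centers; infer_instance

def pvWitness_archive_centers : List String := ["cq12", "7abc", "lyg3", "hello"]

def Spec_archive_centers (ids : List String) (out : List (String × List String)) : Prop :=
  out = archive_centers_alt ids
instance (ids : List String) (out : List (String × List String)) :
    Decidable (Spec_archive_centers ids out) := by unfold Spec_archive_centers; infer_instance

-- ===== CLAIM (what is proved, stated in full; the proofs are below) =====
def Claim_equal_archive_centers : Prop :=
  ∀ (ids : List String), Dom_archive_centers ids → Pre_archive_centers ids →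
    Spec_archive_centers ids (archive_centers ids)

-- ===== LEMMAS AND PROOFS =====

-- A's branch chain performs exactly one modify, at the key pvClassify computes.
theorem pv_step_eq (d : PySem.Dict String (List String)) (id : String) :
    (if (PySem.Str.pyGet? id 0).elim false
          (fun c => c ∈ ['1', '2', '3', '4', '5', '6', '7', '8', '9']) then
       d.modify "center_1" [] (· ++ [id])
     else if PySem.Str.slice id (some 0) (some 2) = "cq" ∨
             PySem.Str.slice id (some 0) (some 2) = "CQ" then
       d.modify "center_2" [] (· ++ [id])
     else if PySem.Str.slice id (some 0) (some 2) = "js" then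
       d.modify "center_3" [] (· ++ [id])
     else if PySem.Str.slice id (some 0) (some 3) = "lyg" ∨
             PySem.Str.slice id (some 0) (some 3) = "Lyg" then
       d.modify "center_4" [] (· ++ [id])
     else if PySem.Str.slice id (some 0) (some 2) = "sx" ∨
             PySem.Str.slice id (some 0) (some 2) = "sy" then
       d.modify "center_5" [] (· ++ [id])
     else if PySem.Str.slice id (some 0) (some 4) = "lung" ∨
             PySem.Str.slice id (some 0) (some 4) = "Lung" then
       d.modify "center_1" [] (· ++ [id])
     else
       d.modify "center_6" [] (· ++ [id]))
    = d.modify (pvClassify id) [] (· ++ [id]) := by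
  unfold pvClassify
  cases h : PySem.Str.pyGet? id 0 with
  | none =>
      have hl : id.toList = [] := by
        have h0 : PySem.Str.pyGet? id ((0 : Nat) : Int) = none := h
        rw [PySem.Str.pyGet?_natCast] at h0
        cases hc : id.toList with
        | nil => rfl
        | cons a as => rw [hc] at h0; simp at h0
      have hid : id = "" := by
        have := congrArg String.ofList hl
        simpa using this
      subst hid
      simp [show PySem.Str.slice "" (some 0) (some 2) = "" from by decide,
            show PySem.Str.slice "" (some 0) (some 3) = "" from by decide,
            show PySem.Str.slice "" (some 0) (some 4) = "" from by decide]
  | some c =>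
      have hdig : ("123456789".toList) = ['1', '2', '3', '4', '5', '6', '7', '8', '9'] := rfl
      simp only [Option.elim, hdig, decide_eq_true_eq]
      split_ifs <;> rfl

theorem pv_classify_mem (id : String) :
    pvClassify id ∈ ["center_1", "center_2", "center_3", "center_4", "center_5", "center_6"] := by
  unfold pvClassify
  cases PySem.Str.pyGet? id 0 with
  | none => simp
  | some c => dsimp only; split_ifs <;> simp

theorem pv_update_self {s : PySem.Set String} (xs : List String)
    (h : ∀ x ∈ xs, x ∈ s) : PySem.Set.update s xs = s := by
  induction xs generalizing s with
  | nil => rfl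
  | cons x xs ih =>
      have hx : PySem.Set.add s x = s := by
        simp [PySem.Set.add, PySem.Set.contains, h x (by simp)]
      simp only [PySem.Set.update, List.foldl_cons] at *
      rw [hx]
      exact ih fun y hy => h y (by simp [hy])

theorem archive_centers_spec' (ids : List String) (_ : Pre_archive_centers ids) :
    archive_centers ids = archive_centers_alt ids := by
  unfold archive_centers
  dsimp only
  have hstep :
      (fun (d : PySem.Dict String (List String)) (id : String) =>
        (if (PySem.Str.pyGet? id 0).elim false
              (fun c => c ∈ ['1', '2', '3', '4', '5', '6', '7', '8', '9']) then
           d.modify "center_1" [] (· ++ [id])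
         else if PySem.Str.slice id (some 0) (some 2) = "cq" ∨
                 PySem.Str.slice id (some 0) (some 2) = "CQ" then
           d.modify "center_2" [] (· ++ [id])
         else if PySem.Str.slice id (some 0) (some 2) = "js" then
           d.modify "center_3" [] (· ++ [id])
         else if PySem.Str.slice id (some 0) (some 3) = "lyg" ∨
                 PySem.Str.slice id (some 0) (some 3) = "Lyg" then
           d.modify "center_4" [] (· ++ [id])
         else if PySem.Str.slice id (some 0) (some 2) = "sx" ∨
                 PySem.Str.slice id (some 0) (some 2) = "sy" then
           d.modify "center_5" [] (· ++ [id])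
         else if PySem.Str.slice id (some 0) (some 4) = "lung" ∨
                 PySem.Str.slice id (some 0) (some 4) = "Lung" then
           d.modify "center_1" [] (· ++ [id])
         else
           d.modify "center_6" [] (· ++ [id])))
      = fun d id => d.modify (pvClassify id) [] (· ++ [id]) :=
    funext fun d => funext fun id => pv_step_eq d id
  rw [hstep]
  set d0 : PySem.Dict String (List String) :=
    PySem.Dict.ofList
      [("center_1", []), ("center_2", []), ("center_3", []),
       ("center_4", []), ("center_5", []), ("center_6", [])] with hd0
  have hpair :
      ids.foldl (fun d id => d.modify (pvClassify id) [] (· ++ [id])) d0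
        = (ids.map (fun id => (pvClassify id, id))).foldl
            (fun d p => d.modify p.1 [] (· ++ [p.2])) d0 := by
    rw [List.foldl_map]
  rw [hpair]
  set D := (ids.map (fun id => (pvClassify id, id))).foldl
      (fun d p => d.modify p.1 [] (· ++ [p.2])) d0 with hD
  have hkeys : D.keys = ["center_1", "center_2", "center_3", "center_4", "center_5", "center_6"] := by
    rw [hD]
    have := PySem.Dict.keys_foldl_modify_key
      (ids.map (fun id => (pvClassify id, id))) Prod.fst ([] : List String)
      (fun _ p v => v ++ [p.2]) d0
    rw [this]
    have hk : d0.keys = ["center_1", "center_2", "center_3", "center_4", "center_5", "center_6"] := by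
      rw [hd0]; decide
    rw [hk]
    apply pv_update_self
    intro x hx
    simp only [List.map_map, List.mem_map] at hx
    rcases hx with ⟨i, _, hi⟩
    rw [← hi]
    exact pv_classify_mem i
  have hnodup : D.keys.Nodup := by rw [hkeys]; decide
  have hgetD : ∀ k, D.getD k [] = d0.getD k [] ++ ids.filter (fun i => pvClassify i == k) := by
    intro k
    rw [hD, PySem.Dict.getD_foldl_modify_append]
    congr 1
    rw [List.filter_map, List.map_map]
    have : ((fun (p : String × String) => p.1 == k) ∘ fun id => (pvClassify id, id))
        = fun i => pvClassify i == k := rfl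
    rw [this]
    have h2 : ((fun (x : String × String) => x.2) ∘ fun id => (pvClassify id, id))
        = fun i => i := rfl
    rw [h2, List.map_id_fun']
    rfl
  rw [PySem.Dict.items_eq_map_keys D hnodup [], hkeys]
  unfold archive_centers_alt
  apply List.map_congr_left
  intro k hk
  have hd0k : d0.getD k [] = [] := by
    fin_cases hk <;> (rw [hd0]; decide)
  rw [hgetD k, hd0k, List.nil_append]

-- ===== VERDICT (by name: the statement is the Claim_ definition above) =====
theorem archive_centers_spec : Claim_equal_archive_centers := by
  intro ids _ hpre
  unfold Spec_archive_centers
  exact archive_centers_spec' ids hpre
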